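-- pv_equiv track=rewrite | github.com/The-Policy-Posse/Social_Media_Final | Classification_Model/scripts/utils.py | assign_single_label
-- ===== SOURCE A (Python) =====
-- def assign_single_label(row, topics, gov_label="Government Operations and Politics"):
--     """
--     Assigns a single primary topic label to a row based on binary topic indicators.
--
--     Prioritizes non-government labels if multiple labels are present.
--     Defaults to "Uncategorized" if no labels are assigned.
--
--     Args:
--         row (list): Binary list indicating topic assignments.
--         topics (list): List of topic names.
--         gov_label (str): Label for "Government Operations and Politics".
--
--     Returns:
--         str: Assigned primary label.
--     """
--
--     ## Get indices of assigned labels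
--     label_indices = [i for i, val in enumerate(row) if val == 1]
--
--     ## Handle rows with no assigned labels
--     if not label_indices:
--         return "Uncategorized"
--
--     ## Get topic names for assigned labels
--     labels = [topics[i] for i in label_indices]
--
--     ## Prioritize non-government labels if present
--     if gov_label in labels:
--         for label in labels:
--             if label != gov_label:
--                 return label
--         return gov_label
--
--     ## Default to the first label
--     return labels[0]
-- ===== SOURCE B (Python) =====
-- def assign_single_label(row, topics, gov_label="Government Operations and Politics"):
--     saw_gov = False
--     for i, val in enumerate(row):
--         if val == 1:
--             label = topics[i]
--             if label != gov_label:
--                 return label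
--             saw_gov = True
--     return gov_label if saw_gov else "Uncategorized"
-- ===== Notes on version B (the rewrite author's own statement) =====
-- stated objective: simpler
-- what changed: Replaces A's three passes (build index list, build label list, membership test plus re-scan for a non-gov label) by one early-returning loop over enumerate(row) with a saw_gov flag; no intermediate lists are built.
import Mathlib
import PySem

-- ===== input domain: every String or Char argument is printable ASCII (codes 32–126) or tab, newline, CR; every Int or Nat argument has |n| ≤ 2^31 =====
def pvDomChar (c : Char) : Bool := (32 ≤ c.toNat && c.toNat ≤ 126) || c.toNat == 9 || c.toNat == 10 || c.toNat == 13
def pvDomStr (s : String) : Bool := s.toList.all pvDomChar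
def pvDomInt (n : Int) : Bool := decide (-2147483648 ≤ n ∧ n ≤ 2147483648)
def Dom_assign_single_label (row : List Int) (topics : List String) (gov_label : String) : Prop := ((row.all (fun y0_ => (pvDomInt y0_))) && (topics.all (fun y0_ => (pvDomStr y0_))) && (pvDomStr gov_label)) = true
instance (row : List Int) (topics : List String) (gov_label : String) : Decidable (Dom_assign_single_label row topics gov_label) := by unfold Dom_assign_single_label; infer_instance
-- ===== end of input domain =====

-- B fuses A's three passes (index list, label list, membership scan + re-scan) into one early-returning loop with a flag; objective: simpler.


-- ===== PORT A =====
-- 'for label in labels: if label != gov_label: return label' / 'return gov_label'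
def pvFirstNonGov : List String → String → String
  | [], g => g
  | l :: ls, g => if l ≠ g then l else pvFirstNonGov ls g

def assign_single_label (row : List Int) (topics : List String) (gov_label : String) : String :=
  let label_indices : List Int :=
    (PySem.List.enumerate row).foldl
      (fun acc p => if p.2 == 1 then acc ++ [p.1] else acc) []
  if label_indices = [] then "Uncategorized"
  else
    -- topics[i]; out-of-range (IndexError in Python) is excluded by Pre_, the port defaults to ""
    let labels := label_indices.map (fun i => (PySem.List.pyGet? topics i).getD "")
    if gov_label ∈ labels then pvFirstNonGov labels gov_label
    else labels.headD ""

-- ===== PORT B =====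
def pvAltLoop (topics : List String) (g : String) : List (Int × Int) → Bool → String
  | [], saw => if saw then g else "Uncategorized"
  | (i, v) :: rest, saw =>
    if v == 1 then
      let label := (PySem.List.pyGet? topics i).getD ""
      if label ≠ g then label else pvAltLoop topics g rest true
    else pvAltLoop topics g rest saw

def assign_single_label_alt (row : List Int) (topics : List String) (gov_label : String) : String :=
  pvAltLoop topics gov_label (PySem.List.enumerate row) false

-- ===== PRECONDITION & SPEC =====
-- Pre_ excludes exactly the inputs where Python A raises IndexError: some index k with row[k] == 1 and k ≥ len(topics).
def Pre_assign_single_label (row : List Int) (topics : List String) (gov_label : String) : Prop :=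
  ∀ k : Nat, k < row.length → row.getD k 0 = 1 → k < topics.length
instance (row : List Int) (topics : List String) (gov_label : String) : Decidable (Pre_assign_single_label row topics gov_label) := by unfold Pre_assign_single_label; infer_instance
def pvWitness_assign_single_label : List Int × List String × String := ([1, 0, 1], ["a", "b", "c"], "a")

def Spec_assign_single_label (row : List Int) (topics : List String) (gov_label : String) (out : String) : Prop := out = assign_single_label_alt row topics gov_label
instance (row : List Int) (topics : List String) (gov_label : String) (out : String) : Decidable (Spec_assign_single_label row topics gov_label out) := by unfold Spec_assign_single_label; infer_instance

-- ===== CLAIM (what is proved, stated in full; the proofs are below) =====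
def Claim_equal_assign_single_label : Prop := ∀ (row : List Int) (topics : List String) (gov_label : String), Dom_assign_single_label row topics gov_label → Pre_assign_single_label row topics gov_label → Spec_assign_single_label row topics gov_label (assign_single_label row topics gov_label)

-- ===== LEMMAS AND PROOFS =====

-- the label a pair (i, v) contributes
def pvLbl (topics : List String) (i : Int) : String := (PySem.List.pyGet? topics i).getD ""

def pvLabels (topics : List String) (xs : List (Int × Int)) : List String :=
  (xs.filter (fun p => p.2 == 1)).map (fun p => pvLbl topics p.1)

-- the shared closed form of both programs
def pvNF (g : String) (saw : Bool) (labels : List String) : String :=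
  match labels.find? (fun l => l != g) with
  | some l => l
  | none => if saw || !labels.isEmpty then g else "Uncategorized"

theorem pvFirstNonGov_eq (ls : List String) (g : String) :
    pvFirstNonGov ls g = (ls.find? (fun l => l != g)).getD g := by
  induction ls with
  | nil => rfl
  | cons l ls ih =>
    by_cases h : l = g
    · have hb : (l != g) = false := by simp [h]
      simp [pvFirstNonGov, List.find?, h, ih]
    · have hb : (l != g) = true := by simp [h]
      simp [pvFirstNonGov, List.find?, hb, h]

theorem pvA_nf (labels : List String) (g : String) :
    (if labels = [] then "Uncategorized"
     else if g ∈ labels then pvFirstNonGov labels g else labels.headD "") =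
    pvNF g false labels := by
  cases labels with
  | nil => rfl
  | cons l ls =>
    simp only [pvNF, List.isEmpty_cons, reduceCtorEq, if_false, Bool.not_false, Bool.or_true]
    by_cases hmem : g ∈ l :: ls
    · simp only [hmem, if_true, pvFirstNonGov_eq]
      cases h : (l :: ls).find? (fun x => x != g) with
      | some x => simp
      | none => simp
    · have hl : l ≠ g := fun h => hmem (h ▸ List.mem_cons_self)
      have hb : (l != g) = true := by simp [hl]
      simp [hmem, List.find?, hb]

theorem pvB_nf (topics : List String) (g : String) (xs : List (Int × Int)) (saw : Bool) :
    pvAltLoop topics g xs saw = pvNF g saw (pvLabels topics xs) := by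
  induction xs generalizing saw with
  | nil => cases saw <;> rfl
  | cons p rest ih =>
    obtain ⟨i, v⟩ := p
    by_cases hv : v = 1
    · by_cases hl : (PySem.List.pyGet? topics i).getD "" = g
      · have hb : (((PySem.List.pyGet? topics i).getD "") != g) = false := by simp [hl]
        simp [pvAltLoop, hv, ih, pvLabels, pvNF, pvLbl, hl]
      · have hb : (((PySem.List.pyGet? topics i).getD "") != g) = true := by simp [hl]
        simp [pvAltLoop, hv, pvLabels, pvNF, pvLbl, hb, hl]
    · simp [pvAltLoop, hv, ih, pvLabels]

-- ===== VERDICT (by name: the statement is the Claim_ definition above) =====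
theorem assign_single_label_spec : Claim_equal_assign_single_label := by
  intro row topics gov_label _ _
  unfold Spec_assign_single_label assign_single_label assign_single_label_alt
  rw [pvB_nf]
  simp only [PySem.List.foldl_append_if, List.nil_append, List.map_map, pvLabels, pvLbl]
  generalize List.filter (fun p => p.2 == 1) (PySem.List.enumerate row) = L
  cases L with
  | nil => rfl
  | cons q qs =>
    rw [← pvA_nf ((q :: qs).map (fun p => (PySem.List.pyGet? topics p.1).getD "")) gov_label]
    rfl
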